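-- pv_equiv track=rewrite | github.com/chenmike1986/change_pov | generate_training_data/conll_data/generate_training_data_m6.py | find_postag_category
-- ===== SOURCE A (Python) =====
-- def find_postag_category(postags):
--     postag_parts = postags.split()
--
--     last_index_of_prp = -1
--     last_index_of_nnp = -1
--     last_index_of_nn = -1
--
--     for i in range(len(postag_parts)):
--         postag = postag_parts[i]
--         if postag.find('PRP') != -1:
--             last_index_of_prp = i
--         elif postag.find('NNP') != -1:
--             last_index_of_nnp = i
--         elif postag == 'NN' or postag == 'NNS':
--             last_index_of_nn = i
--
--     result = -1
--     if last_index_of_prp != -1: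
--         result = 0
--     elif last_index_of_nnp != -1 and last_index_of_nnp > last_index_of_nn:
--         result = 1
--     elif last_index_of_nn != -1 and last_index_of_nn > last_index_of_nnp:
--         result = 2
--
--     return result
-- ===== SOURCE B (Python) =====
-- def find_postag_category(postags):
--     tokens = postags.split()
--     if any('PRP' in t for t in tokens):
--         return 0
--     for t in reversed(tokens):
--         if 'NNP' in t:
--             return 1
--         if t == 'NN' or t == 'NNS':
--             return 2
--     return -1
-- ===== Notes on version B (the rewrite author's own statement) =====
-- stated objective: simpler
-- what changed: Replaced the single forward pass that tracks three last-seen indices plus a final index comparison with a membership test for 'PRP' followed by a short-circuiting backward scan that returns at the first decisive token.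
import Mathlib
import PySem

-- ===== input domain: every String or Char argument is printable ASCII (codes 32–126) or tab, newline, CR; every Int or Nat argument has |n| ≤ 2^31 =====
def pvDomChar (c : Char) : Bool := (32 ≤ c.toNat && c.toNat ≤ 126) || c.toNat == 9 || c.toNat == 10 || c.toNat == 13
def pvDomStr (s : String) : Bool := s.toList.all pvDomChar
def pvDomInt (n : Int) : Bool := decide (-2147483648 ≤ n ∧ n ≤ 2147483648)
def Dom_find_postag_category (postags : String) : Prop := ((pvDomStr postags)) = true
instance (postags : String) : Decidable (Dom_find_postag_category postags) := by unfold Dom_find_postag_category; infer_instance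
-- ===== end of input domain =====

-- B replaces A's forward pass tracking three last-seen indices (plus a final index
-- comparison) by a 'PRP' membership test followed by a short-circuiting backward scan.

-- ===== PORT A =====
def find_postag_category (postags : String) : Int :=
  let postag_parts := PySem.Str.split₀ postags
  let st := (PySem.List.pyRange 0 (PySem.List.len postag_parts) 1).foldl
    (fun (s : Int × Int × Int) i =>
      let postag := PySem.List.pyGetD postag_parts i ""
      if PySem.Str.find postag "PRP" ≠ -1 then (i, s.2.1, s.2.2)
      else if PySem.Str.find postag "NNP" ≠ -1 then (s.1, i, s.2.2)
      else if postag = "NN" ∨ postag = "NNS" then (s.1, s.2.1, i)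
      else s) (-1, -1, -1)
  if st.1 ≠ -1 then 0
  else if st.2.1 ≠ -1 ∧ st.2.1 > st.2.2 then 1
  else if st.2.2 ≠ -1 ∧ st.2.2 > st.2.1 then 2
  else -1

-- ===== PORT B =====
-- backward scan: first decisive token of the given (already reversed) list wins
def fpcRevScan : List String → Int
  | [] => -1
  | t :: ts =>
    if PySem.Str.isIn "NNP" t then 1
    else if t = "NN" ∨ t = "NNS" then 2
    else fpcRevScan ts

def find_postag_category_alt (postags : String) : Int :=
  let tokens := PySem.Str.split₀ postags
  if tokens.any (fun t => PySem.Str.isIn "PRP" t) then 0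
  else fpcRevScan tokens.reverse

-- ===== PRECONDITION & SPEC =====
def Spec_find_postag_category (postags : String) (out : Int) : Prop := out = find_postag_category_alt postags
instance (postags : String) (out : Int) : Decidable (Spec_find_postag_category postags out) := by unfold Spec_find_postag_category; infer_instance

-- ===== CLAIM (what is proved, stated in full; the proofs are below) =====
def Claim_equal_find_postag_category : Prop := ∀ (postags : String), Dom_find_postag_category postags → Spec_find_postag_category postags (find_postag_category postags)

-- ===== LEMMAS AND PROOFS =====

-- A's loop body, abstracted over the (index, token) pair
def fpcStepA (s : Int × Int × Int) (p : Int × String) : Int × Int × Int :=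
  if PySem.Str.find p.2 "PRP" ≠ -1 then (p.1, s.2.1, s.2.2)
  else if PySem.Str.find p.2 "NNP" ≠ -1 then (s.1, p.1, s.2.2)
  else if p.2 = "NN" ∨ p.2 = "NNS" then (s.1, s.2.1, p.1)
  else s

-- A's final if-chain
def fpcFin (s : Int × Int × Int) : Int :=
  if s.1 ≠ -1 then 0
  else if s.2.1 ≠ -1 ∧ s.2.1 > s.2.2 then 1
  else if s.2.2 ≠ -1 ∧ s.2.2 > s.2.1 then 2
  else -1

lemma fpcRevScan_append (l : List String) (t : String) :
    fpcRevScan (l ++ [t]) =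
      if fpcRevScan l = -1 then
        (if PySem.Str.isIn "NNP" t then 1
         else if t = "NN" ∨ t = "NNS" then 2
         else -1)
      else fpcRevScan l := by
  induction l with
  | nil => simp [fpcRevScan]
  | cons h tl ih =>
    by_cases h1 : PySem.Chars.isIn ['N', 'N', 'P'] h.toList = true
    · simp [fpcRevScan, h1]
    · by_cases h2 : h = "NN" ∨ h = "NNS"
      · simp [fpcRevScan, h1, h2]
      · simp [fpcRevScan, h1, h2, ih]

lemma fpc_main (toks : List String) : ∀ (i p np nn : Int),
    p < i → np < i → nn < i → -1 ≤ p → -1 ≤ np → -1 ≤ nn →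
    fpcFin ((PySem.List.enumerate toks i).foldl fpcStepA (p, np, nn)) =
      if p ≠ -1 ∨ toks.any (fun t => PySem.Str.isIn "PRP" t) = true then 0
      else if fpcRevScan toks.reverse = -1 then
        (if np ≠ -1 ∧ np > nn then 1
         else if nn ≠ -1 ∧ nn > np then 2
         else -1)
      else fpcRevScan toks.reverse := by
  induction toks with
  | nil =>
    intro i p np nn hp hnp hnn hp' hnp' hnn'
    simp [PySem.List.enumerate, fpcRevScan, fpcFin]
  | cons t ts ih =>
    intro i p np nn hp hnp hnn hp' hnp' hnn'
    have hrev : (t :: ts).reverse = ts.reverse ++ [t] := by simp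
    by_cases h1 : PySem.Chars.find t.toList ['P', 'R', 'P'] = -1
    · have hin : PySem.Chars.isIn ['P', 'R', 'P'] t.toList = false := by
        rw [PySem.Chars.isIn_eq_false_iff]
        exact (PySem.Chars.find_eq_neg_one_iff _ _).mp h1
      by_cases h2 : PySem.Chars.find t.toList ['N', 'N', 'P'] = -1
      · by_cases h3 : t = "NN" ∨ t = "NNS"
        · -- NN / NNS token
          have hin2 : PySem.Chars.isIn ['N', 'N', 'P'] t.toList = false := by
            rw [PySem.Chars.isIn_eq_false_iff]
            exact (PySem.Chars.find_eq_neg_one_iff _ _).mp h2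
          have hstep : fpcStepA (p, np, nn) (i, t) = (p, np, i) := by
            simp [fpcStepA, h1, h2, h3]
          rw [PySem.List.enumerate_cons, List.foldl_cons, hstep,
            ih (i+1) p np i (by omega) (by omega) (by omega) hp' hnp' (by omega),
            hrev, fpcRevScan_append]
          by_cases hr : fpcRevScan ts.reverse = -1
          · have hfb1 : ¬ (np ≠ -1 ∧ np > i) := by omega
            have hfb2 : i ≠ -1 ∧ i > np := by omega
            simp [hin, hin2, h3, hr, hfb1, hfb2]
          · simp [hin, hr]
        · -- token matches nothing
          have hin2 : PySem.Chars.isIn ['N', 'N', 'P'] t.toList = false := by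
            rw [PySem.Chars.isIn_eq_false_iff]
            exact (PySem.Chars.find_eq_neg_one_iff _ _).mp h2
          have hstep : fpcStepA (p, np, nn) (i, t) = (p, np, nn) := by
            simp [fpcStepA, h1, h2, h3]
          rw [PySem.List.enumerate_cons, List.foldl_cons, hstep,
            ih (i+1) p np nn (by omega) (by omega) (by omega) hp' hnp' hnn',
            hrev, fpcRevScan_append]
          by_cases hr : fpcRevScan ts.reverse = -1
          · simp [hin, hin2, h3, hr]
          · simp [hin, hr]
      · -- token contains 'NNP'
        have hin2 : PySem.Chars.isIn ['N', 'N', 'P'] t.toList = true := by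
          rw [PySem.Chars.isIn_iff_infix]
          exact (PySem.Chars.find_ne_neg_one_iff _ _).mp h2
        have hstep : fpcStepA (p, np, nn) (i, t) = (p, i, nn) := by
          simp [fpcStepA, h1, h2]
        rw [PySem.List.enumerate_cons, List.foldl_cons, hstep,
          ih (i+1) p i nn (by omega) (by omega) (by omega) hp' (by omega) hnn',
          hrev, fpcRevScan_append]
        by_cases hr : fpcRevScan ts.reverse = -1
        · have hfb : i ≠ -1 ∧ i > nn := by omega
          simp [hin, hin2, hr, hfb]
        · simp [hin, hr]
    · -- token contains 'PRP'
      have hin : PySem.Chars.isIn ['P', 'R', 'P'] t.toList = true := by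
        rw [PySem.Chars.isIn_iff_infix]
        exact (PySem.Chars.find_ne_neg_one_iff _ _).mp h1
      have hstep : fpcStepA (p, np, nn) (i, t) = (i, np, nn) := by
        simp [fpcStepA, h1]
      have h0 : ¬ (i = -1) := by omega
      rw [PySem.List.enumerate_cons, List.foldl_cons, hstep,
        ih (i+1) i np nn (by omega) (by omega) (by omega) (by omega) hnp' hnn']
      simp [hin, h0]

-- ===== VERDICT (by name: the statement is the Claim_ definition above) =====
theorem find_postag_category_spec : Claim_equal_find_postag_category := by
  intro postags _
  unfold Spec_find_postag_category find_postag_category find_postag_category_alt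
  set toks := PySem.Str.split₀ postags with htoks
  have hfold : (PySem.List.pyRange 0 (PySem.List.len toks) 1).foldl
      (fun (s : Int × Int × Int) i =>
        let postag := PySem.List.pyGetD toks i ""
        if PySem.Str.find postag "PRP" ≠ -1 then (i, s.2.1, s.2.2)
        else if PySem.Str.find postag "NNP" ≠ -1 then (s.1, i, s.2.2)
        else if postag = "NN" ∨ postag = "NNS" then (s.1, s.2.1, i)
        else s) (-1, -1, -1)
      = (PySem.List.enumerate toks 0).foldl fpcStepA (-1, -1, -1) := by
    rw [PySem.List.enumerate_eq_map_pyRange (d := ""), List.foldl_map]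
    rfl
  show fpcFin _ = _
  rw [hfold, fpc_main toks 0 (-1) (-1) (-1) (by omega) (by omega) (by omega)
      (by omega) (by omega) (by omega)]
  by_cases hA : ∃ x ∈ toks, PySem.Chars.isIn ['P', 'R', 'P'] x.toList = true
  · simp [hA]
  · by_cases hr : fpcRevScan toks.reverse = -1
    · simp [hA, hr]
    · simp [hA, hr]
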